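-- pv_equiv track=rewrite | github.com/Alchemication/zdrowskit | src/daemon_telegram_chat.py | _friendly_agent_stage
-- ===== SOURCE A (Python) =====
-- def _friendly_agent_stage(progress: str) -> str:
--     """Convert noisy agent stream progress into a stable user-facing stage."""
--     normalized = progress.lower()
--     if "session" in normalized:
--         return "Session ready"
--     if any(token in normalized for token in ("patch", "edit", "file", "write")):
--         return "Inspecting or editing files"
--     if any(
--         token in normalized for token in ("command", "cmd", "exec", "bash", "tool")
--     ):
--         return "Running a repo command"
--     if any(
--         token in normalized for token in ("message", "final", "answer", "assistant")
--     ):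
--         return "Drafting the reply"
--     return "Working through the request"
-- ===== SOURCE B (Python) =====
-- # B: single left-to-right sweep over the string, matching tokens by prefix at each
-- # position and keeping the minimum stage priority seen, instead of A's chain of
-- # per-group whole-string substring tests.
-- _TOKENS = [
--     ("session", 0),
--     ("patch", 1), ("edit", 1), ("file", 1), ("write", 1),
--     ("command", 2), ("cmd", 2), ("exec", 2), ("bash", 2), ("tool", 2),
--     ("message", 3), ("final", 3), ("answer", 3), ("assistant", 3),
-- ]
-- _LABELS = [
--     "Session ready",
--     "Inspecting or editing files",
--     "Running a repo command",
--     "Drafting the reply",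
--     "Working through the request",
-- ]
--
-- def _friendly_agent_stage(progress: str) -> str:
--     normalized = progress.lower()
--     best = 4
--     for i in range(len(normalized)):
--         for token, pri in _TOKENS:
--             if pri < best and normalized.startswith(token, i):
--                 best = pri
--     return _LABELS[best]
-- ===== Notes on version B (the rewrite author's own statement) =====
-- stated objective: alternative
-- what changed: Replaces A's chain of per-group whole-string substring tests by a single left-to-right sweep over the string that prefix-matches all tokens at each position and keeps the minimum stage priority, indexing a label table at the end.
import Mathlib
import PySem

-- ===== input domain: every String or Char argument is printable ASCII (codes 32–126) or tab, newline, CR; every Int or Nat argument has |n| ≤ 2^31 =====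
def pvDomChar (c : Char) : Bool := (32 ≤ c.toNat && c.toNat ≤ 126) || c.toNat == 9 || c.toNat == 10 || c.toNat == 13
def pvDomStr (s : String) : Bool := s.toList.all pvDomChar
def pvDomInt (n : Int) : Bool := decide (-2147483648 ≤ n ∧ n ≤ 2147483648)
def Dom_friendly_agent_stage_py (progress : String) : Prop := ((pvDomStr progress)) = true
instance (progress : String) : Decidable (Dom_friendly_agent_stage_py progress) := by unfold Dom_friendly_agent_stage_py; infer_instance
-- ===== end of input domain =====

-- B replaces A's chain of per-group substring tests by a single sweep over the string
-- that prefix-matches tokens at each position, keeping the minimum stage priority.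

-- ===== PORT A =====
def friendly_agent_stage_py (progress : String) : String :=
  let normalized := PySem.Str.lower progress
  if PySem.Str.isIn "session" normalized then "Session ready"
  else if (["patch", "edit", "file", "write"].any (fun token => PySem.Str.isIn token normalized)) then
    "Inspecting or editing files"
  else if (["command", "cmd", "exec", "bash", "tool"].any (fun token => PySem.Str.isIn token normalized)) then
    "Running a repo command"
  else if (["message", "final", "answer", "assistant"].any (fun token => PySem.Str.isIn token normalized)) then
    "Drafting the reply"
  else "Working through the request"

-- ===== PORT B =====
-- Source B's token/priority table and label table
def pvStageTokens : List (List Char × Nat) :=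
  [("session".toList, 0),
   ("patch".toList, 1), ("edit".toList, 1), ("file".toList, 1), ("write".toList, 1),
   ("command".toList, 2), ("cmd".toList, 2), ("exec".toList, 2), ("bash".toList, 2), ("tool".toList, 2),
   ("message".toList, 3), ("final".toList, 3), ("answer".toList, 3), ("assistant".toList, 3)]

def pvStageLabels : List String :=
  ["Session ready", "Inspecting or editing files", "Running a repo command",
   "Drafting the reply", "Working through the request"]

-- Source B: for i in range(len(normalized)): for token, pri in _TOKENS: if pri < best and
-- normalized.startswith(token, i): best = pri.  Python's startswith(token, i) with
-- 0 ≤ i is exactly a prefix test against s[i:], i.e. Chars.startswith (s.drop i) token.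
-- _LABELS[best] is in range (best ≤ 4 always), ported as getD.
def friendly_agent_stage_py_alt (progress : String) : String :=
  let s := (PySem.Str.lower progress).toList
  let best := (List.range s.length).foldl
    (fun best i => pvStageTokens.foldl
      (fun b tp => if tp.2 < b ∧ PySem.Chars.startswith (s.drop i) tp.1 = true then tp.2 else b)
      best) 4
  pvStageLabels.getD best "Working through the request"

-- ===== PRECONDITION & SPEC =====
def Spec_friendly_agent_stage_py (progress : String) (out : String) : Prop := out = friendly_agent_stage_py_alt progress
instance (progress : String) (out : String) : Decidable (Spec_friendly_agent_stage_py progress out) := by unfold Spec_friendly_agent_stage_py; infer_instance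

-- ===== CLAIM (what is proved, stated in full; the proofs are below) =====
def Claim_equal_friendly_agent_stage_py : Prop := ∀ (progress : String), Dom_friendly_agent_stage_py progress → Spec_friendly_agent_stage_py progress (friendly_agent_stage_py progress)

-- ===== LEMMAS AND PROOFS =====

-- generic fold lemmas for a decreasing step
theorem pv_foldl_le_init {α : Type} (f : Nat → α → Nat) (h : ∀ b x, f b x ≤ b) :
    ∀ (l : List α) (b : Nat), l.foldl f b ≤ b
  | [], b => le_refl b
  | x :: l, b => le_trans (pv_foldl_le_init f h l (f b x)) (h b x)

theorem pv_le_foldl {α : Type} (f : Nat → α → Nat) (k : Nat) :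
    ∀ (l : List α) (b : Nat), (∀ b' x, x ∈ l → k ≤ b' → k ≤ f b' x) → k ≤ b → k ≤ l.foldl f b
  | [], _, _, hb => hb
  | x :: l, b, h, hb =>
      pv_le_foldl f k l (f b x) (fun b' y hy => h b' y (List.mem_cons_of_mem _ hy))
        (h b x List.mem_cons_self hb)

theorem pv_foldl_le_of_mem {α : Type} (f : Nat → α → Nat) (h : ∀ b x, f b x ≤ b)
    {x : α} {c : Nat} (hfx : ∀ b, f b x ≤ c) :
    ∀ (l : List α), x ∈ l → ∀ b, l.foldl f b ≤ c := by
  intro l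
  induction l with
  | nil => intro hx; cases hx
  | cons y l ih =>
      intro hx b
      rcases List.mem_cons.mp hx with rfl | hx'
      · exact le_trans (pv_foldl_le_init f h l (f b x)) (hfx b)
      · exact ih hx' (f b y)

-- abbreviation for B's double fold (proof-side only)
def pvBest (s : List Char) : Nat :=
  (List.range s.length).foldl
    (fun best i => pvStageTokens.foldl
      (fun b tp => if tp.2 < b ∧ PySem.Chars.startswith (s.drop i) tp.1 = true then tp.2 else b)
      best) 4

theorem pv_inner_le_init (s : List Char) (i : Nat) (b : Nat) :
    pvStageTokens.foldl
      (fun b tp => if tp.2 < b ∧ PySem.Chars.startswith (s.drop i) tp.1 = true then tp.2 else b)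
      b ≤ b := by
  apply pv_foldl_le_init
  intro b tp
  split
  · omega
  · exact le_refl b

-- a prefix match at some position is a substring occurrence
theorem pv_match_isIn (s t : List Char) (i : Nat)
    (h : PySem.Chars.startswith (s.drop i) t = true) : PySem.Chars.isIn t s = true := by
  rw [← PySem.Chars.exists_prefix_drop_iff_isIn]
  exact ⟨i, (PySem.Chars.startswith_iff _ _).mp h⟩

-- a substring occurrence of a nonempty token gives a prefix match at a position < length
theorem pv_isIn_match (s t : List Char) (ht : t ≠ [])
    (h : PySem.Chars.isIn t s = true) :
    ∃ i, i ∈ List.range s.length ∧ PySem.Chars.startswith (s.drop i) t = true := by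
  rcases (PySem.Chars.exists_prefix_drop_iff_isIn (s := s) (sub := t)).mpr h with ⟨j, hj⟩
  refine ⟨j, List.mem_range.mpr ?_, (PySem.Chars.startswith_iff _ _).mpr hj⟩
  by_contra hlen
  have hdrop : s.drop j = [] := List.drop_eq_nil_of_le (by omega)
  rw [hdrop] at hj
  exact ht (List.prefix_nil.mp hj)

-- lower bound: if no token of priority < k occurs in s, then k ≤ pvBest s
theorem pv_best_ge (s : List Char) (k : Nat)
    (h : ∀ tp ∈ pvStageTokens, tp.2 < k → PySem.Chars.isIn tp.1 s = false) (hk : k ≤ 4) :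
    k ≤ pvBest s := by
  apply pv_le_foldl _ k _ _ _ hk
  intro b i _ hb
  apply pv_le_foldl _ k _ _ _ hb
  intro b' tp htp hb'
  split
  · rename_i hcond
    by_contra hlt
    have hfalse := h tp htp (by omega)
    rw [pv_match_isIn s tp.1 i hcond.2] at hfalse
    cases hfalse
  · exact hb'

-- upper bound: an occurring token bounds pvBest by its priority
theorem pv_best_le (s : List Char) (tp : List Char × Nat) (htp : tp ∈ pvStageTokens)
    (ht : tp.1 ≠ []) (h : PySem.Chars.isIn tp.1 s = true) : pvBest s ≤ tp.2 := by
  rcases pv_isIn_match s tp.1 ht h with ⟨i, hi, hsw⟩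
  refine pv_foldl_le_of_mem _ (fun b i => pv_inner_le_init s i b) ?_ _ hi 4
  intro b
  refine pv_foldl_le_of_mem _ ?_ ?_ _ htp b
  · intro b tp'
    split
    · omega
    · exact le_refl b
  · intro b
    split
    · exact le_refl tp.2
    · rename_i hc
      have : ¬ tp.2 < b := fun hb => hc ⟨hb, hsw⟩
      omega

theorem pv_best_le_four (s : List Char) : pvBest s ≤ 4 :=
  pv_foldl_le_init _ (fun b i => pv_inner_le_init s i b) _ 4

-- B's value is the label of pvBest
theorem pv_alt_eq (progress : String) :
    friendly_agent_stage_py_alt progress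
      = pvStageLabels.getD (pvBest (PySem.Str.lower progress).toList) "Working through the request" := rfl

-- staged lower bounds on pvBest from the absence of the lower-priority tokens
theorem pv_ge1 (s : List Char)
    (h0 : PySem.Chars.isIn "session".toList s = false) : 1 ≤ pvBest s := by
  apply pv_best_ge s 1 _ (by omega)
  intro tp htp hlt
  simp only [pvStageTokens, List.mem_cons, List.not_mem_nil, or_false] at htp
  rcases htp with rfl|rfl|rfl|rfl|rfl|rfl|rfl|rfl|rfl|rfl|rfl|rfl|rfl|rfl <;> first
    | exact absurd hlt (by decide)
    | exact h0

theorem pv_ge2 (s : List Char)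
    (h0 : PySem.Chars.isIn "session".toList s = false)
    (hp : PySem.Chars.isIn "patch".toList s = false)
    (he : PySem.Chars.isIn "edit".toList s = false)
    (hf : PySem.Chars.isIn "file".toList s = false)
    (hw : PySem.Chars.isIn "write".toList s = false) : 2 ≤ pvBest s := by
  apply pv_best_ge s 2 _ (by omega)
  intro tp htp hlt
  simp only [pvStageTokens, List.mem_cons, List.not_mem_nil, or_false] at htp
  rcases htp with rfl|rfl|rfl|rfl|rfl|rfl|rfl|rfl|rfl|rfl|rfl|rfl|rfl|rfl <;> first
    | exact absurd hlt (by decide)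
    | exact h0
    | exact hp
    | exact he
    | exact hf
    | exact hw

theorem pv_ge3 (s : List Char)
    (h0 : PySem.Chars.isIn "session".toList s = false)
    (hp : PySem.Chars.isIn "patch".toList s = false)
    (he : PySem.Chars.isIn "edit".toList s = false)
    (hf : PySem.Chars.isIn "file".toList s = false)
    (hw : PySem.Chars.isIn "write".toList s = false)
    (hc : PySem.Chars.isIn "command".toList s = false)
    (hm : PySem.Chars.isIn "cmd".toList s = false)
    (hx : PySem.Chars.isIn "exec".toList s = false)
    (hb : PySem.Chars.isIn "bash".toList s = false)
    (ht : PySem.Chars.isIn "tool".toList s = false) : 3 ≤ pvBest s := by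
  apply pv_best_ge s 3 _ (by omega)
  intro tp htp hlt
  simp only [pvStageTokens, List.mem_cons, List.not_mem_nil, or_false] at htp
  rcases htp with rfl|rfl|rfl|rfl|rfl|rfl|rfl|rfl|rfl|rfl|rfl|rfl|rfl|rfl <;> first
    | exact absurd hlt (by decide)
    | exact h0
    | exact hp
    | exact he
    | exact hf
    | exact hw
    | exact hc
    | exact hm
    | exact hx
    | exact hb
    | exact ht

theorem pv_ge4 (s : List Char)
    (h0 : PySem.Chars.isIn "session".toList s = false)
    (hp : PySem.Chars.isIn "patch".toList s = false)
    (he : PySem.Chars.isIn "edit".toList s = false)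
    (hf : PySem.Chars.isIn "file".toList s = false)
    (hw : PySem.Chars.isIn "write".toList s = false)
    (hc : PySem.Chars.isIn "command".toList s = false)
    (hm : PySem.Chars.isIn "cmd".toList s = false)
    (hx : PySem.Chars.isIn "exec".toList s = false)
    (hb : PySem.Chars.isIn "bash".toList s = false)
    (ht : PySem.Chars.isIn "tool".toList s = false)
    (hg : PySem.Chars.isIn "message".toList s = false)
    (hn : PySem.Chars.isIn "final".toList s = false)
    (ha : PySem.Chars.isIn "answer".toList s = false)
    (hA : PySem.Chars.isIn "assistant".toList s = false) : 4 ≤ pvBest s := by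
  apply pv_best_ge s 4 _ (le_refl 4)
  intro tp htp _
  simp only [pvStageTokens, List.mem_cons, List.not_mem_nil, or_false] at htp
  rcases htp with rfl|rfl|rfl|rfl|rfl|rfl|rfl|rfl|rfl|rfl|rfl|rfl|rfl|rfl <;> first
    | exact h0
    | exact hp
    | exact he
    | exact hf
    | exact hw
    | exact hc
    | exact hm
    | exact hx
    | exact hb
    | exact ht
    | exact hg
    | exact hn
    | exact ha
    | exact hA

-- upper bound on pvBest from a matching group member (group priority k)
theorem pv_le_of_any (s : List Char) (k : Nat) (ts : List String)
    (hts : ∀ t ∈ ts, (t.toList, k) ∈ pvStageTokens ∧ t.toList ≠ [])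
    (h : ∃ t ∈ ts, PySem.Chars.isIn t.toList s = true) : pvBest s ≤ k := by
  rcases h with ⟨t, htl, ht⟩
  exact pv_best_le s (t.toList, k) (hts t htl).1 (hts t htl).2 ht

-- ===== VERDICT (by name: the statement is the Claim_ definition above) =====
set_option maxHeartbeats 1000000 in
theorem friendly_agent_stage_py_spec : Claim_equal_friendly_agent_stage_py := by
  intro progress _
  unfold Spec_friendly_agent_stage_py
  rw [pv_alt_eq]
  unfold friendly_agent_stage_py
  set nm := PySem.Str.lower progress with hnm
  by_cases h0 : PySem.Str.isIn "session" nm = true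
  · have hle := pv_best_le nm.toList ("session".toList, 0) (by decide) (by decide)
      (by simpa using h0)
    have hb : pvBest nm.toList = 0 := by omega
    rw [if_pos h0, hb]
    rfl
  · have h0c : PySem.Chars.isIn "session".toList nm.toList = false := by simpa using h0
    rw [if_neg h0]
    by_cases h1 : (["patch", "edit", "file", "write"].any
        (fun token => PySem.Str.isIn token nm)) = true
    · have hle : pvBest nm.toList ≤ 1 := by
        apply pv_le_of_any nm.toList 1 ["patch", "edit", "file", "write"] (by decide)
        rcases List.any_eq_true.mp h1 with ⟨t, htl, ht⟩
        exact ⟨t, htl, by simpa using ht⟩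
      have hb : pvBest nm.toList = 1 := le_antisymm hle (pv_ge1 nm.toList h0c)
      rw [if_pos h1, hb]
      rfl
    · rw [if_neg h1]
      rw [Bool.not_eq_true, List.any_eq_false] at h1
      have hpc : PySem.Chars.isIn "patch".toList nm.toList = false := by
        simpa using h1 "patch" (by decide)
      have hec : PySem.Chars.isIn "edit".toList nm.toList = false := by
        simpa using h1 "edit" (by decide)
      have hfc : PySem.Chars.isIn "file".toList nm.toList = false := by
        simpa using h1 "file" (by decide)
      have hwc : PySem.Chars.isIn "write".toList nm.toList = false := by
        simpa using h1 "write" (by decide)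
      by_cases h2 : (["command", "cmd", "exec", "bash", "tool"].any
          (fun token => PySem.Str.isIn token nm)) = true
      · have hle : pvBest nm.toList ≤ 2 := by
          apply pv_le_of_any nm.toList 2 ["command", "cmd", "exec", "bash", "tool"] (by decide)
          rcases List.any_eq_true.mp h2 with ⟨t, htl, ht⟩
          exact ⟨t, htl, by simpa using ht⟩
        have hb : pvBest nm.toList = 2 :=
          le_antisymm hle (pv_ge2 nm.toList h0c hpc hec hfc hwc)
        rw [if_pos h2, hb]
        rfl
      · rw [if_neg h2]
        rw [Bool.not_eq_true, List.any_eq_false] at h2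
        have hcc : PySem.Chars.isIn "command".toList nm.toList = false := by
          simpa using h2 "command" (by decide)
        have hmc : PySem.Chars.isIn "cmd".toList nm.toList = false := by
          simpa using h2 "cmd" (by decide)
        have hxc : PySem.Chars.isIn "exec".toList nm.toList = false := by
          simpa using h2 "exec" (by decide)
        have hbc : PySem.Chars.isIn "bash".toList nm.toList = false := by
          simpa using h2 "bash" (by decide)
        have htc : PySem.Chars.isIn "tool".toList nm.toList = false := by
          simpa using h2 "tool" (by decide)
        by_cases h3 : (["message", "final", "answer", "assistant"].any
            (fun token => PySem.Str.isIn token nm)) = true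
        · have hle : pvBest nm.toList ≤ 3 := by
            apply pv_le_of_any nm.toList 3 ["message", "final", "answer", "assistant"] (by decide)
            rcases List.any_eq_true.mp h3 with ⟨t, htl, ht⟩
            exact ⟨t, htl, by simpa using ht⟩
          have hb : pvBest nm.toList = 3 :=
            le_antisymm hle (pv_ge3 nm.toList h0c hpc hec hfc hwc hcc hmc hxc hbc htc)
          rw [if_pos h3, hb]
          rfl
        · rw [if_neg h3]
          rw [Bool.not_eq_true, List.any_eq_false] at h3
          have hgc : PySem.Chars.isIn "message".toList nm.toList = false := by
            simpa using h3 "message" (by decide)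
          have hnc : PySem.Chars.isIn "final".toList nm.toList = false := by
            simpa using h3 "final" (by decide)
          have hac : PySem.Chars.isIn "answer".toList nm.toList = false := by
            simpa using h3 "answer" (by decide)
          have hsc : PySem.Chars.isIn "assistant".toList nm.toList = false := by
            simpa using h3 "assistant" (by decide)
          have hb : pvBest nm.toList = 4 :=
            le_antisymm (pv_best_le_four nm.toList)
              (pv_ge4 nm.toList h0c hpc hec hfc hwc hcc hmc hxc hbc htc hgc hnc hac hsc)
          rw [hb]
          rfl
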